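-- pv_equiv track=rewrite | github.com/Zzhaoo/NJU-2021-LCYOJ | 3/3-10.py | solute
-- ===== SOURCE A (Python) =====
-- def solute(l):
--     if len(l) <= 1:
--         return 0
--     else:
--         res = 0
--         for i in range(1, len(l)):
--             step = 1
--             while i - step >= 0 and i + step - 1 < len(l):
--                 if sum(l[i-step:i]) == sum(l[i:i+step]) and step > res:
--                     res = step
--                 step += 1
--         return res * 2
-- ===== SOURCE B (Python) =====
-- def solute(l):
--     n = len(l)
--     pre = [0]
--     s = 0
--     for x in l:
--         s += x
--         pre.append(s)
--     res = 0
--     for i in range(1, n):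
--         for step in range(1, min(i, n - i) + 1):
--             if pre[i] - pre[i - step] == pre[i + step] - pre[i] and step > res:
--                 res = step
--     return 2 * res
-- ===== Notes on version B (the rewrite author's own statement) =====
-- stated objective: faster
-- what changed: B precomputes a prefix-sum table once and compares each window pair in O(1), replacing A's per-step slice sums, and replaces the unbounded while with a bounded for-range.
import Mathlib
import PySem

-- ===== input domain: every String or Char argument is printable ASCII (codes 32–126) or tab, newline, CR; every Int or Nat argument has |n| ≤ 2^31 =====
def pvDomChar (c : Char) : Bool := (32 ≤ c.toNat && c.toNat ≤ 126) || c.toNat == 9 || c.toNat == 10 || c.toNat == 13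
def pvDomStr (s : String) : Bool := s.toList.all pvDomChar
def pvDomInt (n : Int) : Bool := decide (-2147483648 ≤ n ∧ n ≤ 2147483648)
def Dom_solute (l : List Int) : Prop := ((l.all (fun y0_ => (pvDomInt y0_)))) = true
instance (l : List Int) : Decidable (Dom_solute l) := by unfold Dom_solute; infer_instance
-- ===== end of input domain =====

-- B replaces A's repeated slice sums by a prefix-sum table and a bounded for-range.

-- ===== PORT A =====
-- the 'while i - step >= 0 and i + step - 1 < len(l)' loop, with enough fuel (it runs at most len(l) times)
def soluteWhile (l : List Int) (i : Int) : Nat → Int → Int → Int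
  | 0, _, res => res
  | fuel + 1, step, res =>
    if 0 ≤ i - step ∧ i + step - 1 < (l.length : Int) then
      soluteWhile l i fuel (step + 1)
        (if (PySem.List.slice l (some (i - step)) (some i)).sum
              = (PySem.List.slice l (some i) (some (i + step))).sum ∧ res < step
         then step else res)
    else res

def solute (l : List Int) : Int :=
  if (l.length : Int) ≤ 1 then 0
  else
    ((PySem.List.pyRange 1 (l.length : Int) 1).foldl
      (fun res i => soluteWhile l i (l.length + 1) 1 res) 0) * 2

-- ===== PORT B =====
-- pre = [0]; s = 0; for x in l: s += x; pre.append(s)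
def buildPre (l : List Int) : List Int :=
  (l.foldl (fun (acc : List Int × Int) x => (acc.1 ++ [acc.2 + x], acc.2 + x)) ([0], 0)).1

def solute_alt (l : List Int) : Int :=
  2 * ((PySem.List.pyRange 1 (l.length : Int) 1).foldl
    (fun res i =>
      (PySem.List.pyRange 1 (min i ((l.length : Int) - i) + 1) 1).foldl
        (fun res step =>
          if PySem.List.pyGetD (buildPre l) i 0 - PySem.List.pyGetD (buildPre l) (i - step) 0
               = PySem.List.pyGetD (buildPre l) (i + step) 0 - PySem.List.pyGetD (buildPre l) i 0
                 ∧ res < step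
          then step else res) res) 0)

-- ===== PRECONDITION & SPEC =====
def Spec_solute (l : List Int) (out : Int) : Prop := out = solute_alt l
instance (l : List Int) (out : Int) : Decidable (Spec_solute l out) := by unfold Spec_solute; infer_instance

-- ===== CLAIM (what is proved, stated in full; the proofs are below) =====
def Claim_equal_solute : Prop := ∀ (l : List Int), Dom_solute l → Spec_solute l (solute l)

-- ===== LEMMAS AND PROOFS =====

lemma buildPre_fold (l : List Int) : ∀ (P : List Int) (s : Int),
    (l.foldl (fun (acc : List Int × Int) x => (acc.1 ++ [acc.2 + x], acc.2 + x)) (P, s)).1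
      = P ++ (List.range l.length).map (fun k => s + (l.take (k + 1)).sum) := by
  induction l with
  | nil => simp
  | cons x t ih =>
    intro P s
    simp only [List.foldl_cons, ih, List.length_cons, List.range_succ_eq_map, List.map_cons,
      List.map_map]
    simp [List.append_assoc, Function.comp_def, add_assoc]

lemma buildPre_eq (l : List Int) :
    buildPre l = (List.range (l.length + 1)).map (fun k => ((l.take k).sum : Int)) := by
  unfold buildPre
  rw [buildPre_fold]
  simp [List.range_succ_eq_map, List.map_map, Function.comp_def]

lemma buildPre_get (l : List Int) (j : Int) (h0 : 0 ≤ j) (h1 : j ≤ (l.length : Int)) :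
    PySem.List.pyGetD (buildPre l) j 0 = ((l.take j.toNat).sum : Int) := by
  rw [buildPre_eq]
  rw [PySem.List.pyGetD_eq_getElem _ 0 h0 (by simp; omega)]
  rw [List.getElem_map, List.getElem_range]

lemma slice_sum (l : List Int) (a b : Int) (h0 : 0 ≤ a) (hab : a ≤ b) :
    (PySem.List.slice l (some a) (some b)).sum
      = (l.take b.toNat).sum - (l.take a.toNat).sum := by
  rw [PySem.List.slice_toNat l h0 (le_trans h0 hab)]
  have hb : b.toNat = a.toNat + (b.toNat - a.toNat) := by omega
  have h : l.take b.toNat = l.take a.toNat ++ (l.drop a.toNat).take (b.toNat - a.toNat) := by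
    conv_lhs => rw [hb]
    exact List.take_add
  rw [h, List.sum_append]
  ring

lemma inner_eq (l : List Int) (i : Int) (h1 : 1 ≤ i) (h2 : i < (l.length : Int)) :
    ∀ (fuel : Nat) (step res : Int), 1 ≤ step →
      (min i ((l.length : Int) - i) + 1 - step).toNat ≤ fuel →
      soluteWhile l i fuel step res
        = (PySem.List.pyRange step (min i ((l.length : Int) - i) + 1) 1).foldl
            (fun res step =>
              if PySem.List.pyGetD (buildPre l) i 0 - PySem.List.pyGetD (buildPre l) (i - step) 0
                   = PySem.List.pyGetD (buildPre l) (i + step) 0 - PySem.List.pyGetD (buildPre l) i 0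
                     ∧ res < step
              then step else res) res := by
  intro fuel
  induction fuel with
  | zero =>
    intro step res hs hf
    have : min i ((l.length : Int) - i) + 1 ≤ step := by omega
    rw [PySem.List.pyRange_one_eq_nil this]
    simp [soluteWhile]
  | succ fuel ih =>
    intro step res hs hf
    by_cases hc : 0 ≤ i - step ∧ i + step - 1 < (l.length : Int)
    · obtain ⟨hc1, hc2⟩ := hc
      rw [PySem.List.pyRange_one_cons (by omega)]
      simp only [soluteWhile, if_pos (And.intro hc1 hc2), List.foldl_cons]
      rw [ih (step + 1) _ (by omega) (by omega)]
      congr 1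
      rw [slice_sum l (i - step) i hc1 (by omega),
          slice_sum l i (i + step) (by omega) (by omega),
          buildPre_get l i (by omega) (by omega),
          buildPre_get l (i - step) hc1 (by omega),
          buildPre_get l (i + step) (by omega) (by omega)]
    · have hend : min i ((l.length : Int) - i) + 1 ≤ step := by omega
      rw [PySem.List.pyRange_one_eq_nil hend, List.foldl_nil]
      simp only [soluteWhile]
      rw [if_neg hc]

-- ===== VERDICT (by name: the statement is the Claim_ definition above) =====
theorem solute_spec : Claim_equal_solute := by
  intro l _
  unfold Spec_solute solute solute_alt
  by_cases hn : (l.length : Int) ≤ 1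
  · rw [if_pos hn, PySem.List.pyRange_one_eq_nil (by omega)]
    simp
  · rw [if_neg hn]
    rw [PySem.List.foldl_congr_mem _ _ (fun res i =>
      (PySem.List.pyRange 1 (min i ((l.length : Int) - i) + 1) 1).foldl
        (fun res step =>
          if PySem.List.pyGetD (buildPre l) i 0 - PySem.List.pyGetD (buildPre l) (i - step) 0
               = PySem.List.pyGetD (buildPre l) (i + step) 0 - PySem.List.pyGetD (buildPre l) i 0
                 ∧ res < step
          then step else res) res) _
      (by
        intro acc i hi
        rw [PySem.List.mem_pyRange_one] at hi
        exact inner_eq l i hi.1 hi.2 (l.length + 1) 1 acc (by omega) (by omega))]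
    ring
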